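-- pv_equiv track=rewrite | github.com/GiJeongCho/gec | src/v1/correct_text.py | binding_segment_index
-- ===== SOURCE A (Python) =====
-- def binding_segment_index(
--         sentence_index_list: list[tuple[int, int]], unit: int
-- ) -> list[tuple[int, int]]:
--     length_list = [end - start for start, end in sentence_index_list]
--
--     result = []
--     current_sum = 0
--     current_group = []
--     for length in length_list:
--         if current_sum + length < unit:
--             current_group.append(length)
--             current_sum += length
--         else:
--             if len(current_group) > 0:
--                 result.append(current_group)
--             current_group = [length]
--             current_sum = length
--
--     if current_group:
--         result.append(current_group)
--
--     segment_index_result = []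
--     index_end = 0
--     for length_group in result:
--         index_start = index_end
--         index_end += len(length_group)
--         segment_start = sentence_index_list[index_start][0]
--         segment_end = sentence_index_list[index_end - 1][-1]
--         segment_index_result.append((segment_start, segment_end))
--
--     return segment_index_result
-- ===== SOURCE B (Python) =====
-- def binding_segment_index(
--         sentence_index_list: list[tuple[int, int]], unit: int
-- ) -> list[tuple[int, int]]:
--     # Single fused pass: track the start index of the current group and the
--     # running sum instead of materializing length-groups and re-deriving indices.
--     res = []
--     start = -1  # index of current group's first segment; -1 = no open group
--     current_sum = 0
--     i = 0
--     for s, e in sentence_index_list: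
--         length = e - s
--         if current_sum + length < unit:
--             if start < 0:
--                 start = i
--             current_sum += length
--         else:
--             if start >= 0:
--                 res.append((sentence_index_list[start][0], sentence_index_list[i - 1][1]))
--             start = i
--             current_sum = length
--         i += 1
--     if start >= 0:
--         res.append((sentence_index_list[start][0], sentence_index_list[-1][1]))
--     return res
-- ===== Notes on version B (the rewrite author's own statement) =====
-- stated objective: simpler
-- what changed: Fuses A's two passes (build length-groups, then re-derive index ranges from group sizes) into one loop that tracks the current group's start index and running sum, never materializing the intermediate list of length-groups.
import Mathlib
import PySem

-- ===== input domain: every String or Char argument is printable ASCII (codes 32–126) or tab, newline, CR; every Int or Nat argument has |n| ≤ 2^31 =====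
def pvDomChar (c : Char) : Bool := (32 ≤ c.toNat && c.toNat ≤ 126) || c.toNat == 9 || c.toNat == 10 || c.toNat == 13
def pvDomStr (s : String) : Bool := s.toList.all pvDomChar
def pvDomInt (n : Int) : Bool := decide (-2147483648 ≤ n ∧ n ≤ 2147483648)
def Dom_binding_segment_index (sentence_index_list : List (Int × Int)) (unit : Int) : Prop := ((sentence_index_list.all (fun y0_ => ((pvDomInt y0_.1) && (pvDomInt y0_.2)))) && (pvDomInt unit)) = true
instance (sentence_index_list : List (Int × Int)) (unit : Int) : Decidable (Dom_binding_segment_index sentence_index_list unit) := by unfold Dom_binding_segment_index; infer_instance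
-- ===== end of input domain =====

-- B fuses A's two passes into one loop that tracks the current group's start index
-- and running sum, never materializing the intermediate list of length-groups (simpler).
-- All list indexings below are provably in range; `.getD (0, 0)` is never the taken branch.

-- ===== PORT A =====
-- first loop body: state (result, current_sum, current_group)
def pvStepA (unit : Int) (acc : List (List Int) × Int × List Int) (length : Int) :
    List (List Int) × Int × List Int :=
  let (result, current_sum, current_group) := acc
  if current_sum + length < unit then
    (result, current_sum + length, current_group ++ [length])
  else
    ((if 0 < current_group.length then result ++ [current_group] else result), length, [length])

-- second loop body: state (segment_index_result, index_end); `[-1]` on a pair is `.2`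
def pvStepA2 (l : List (Int × Int)) (acc : List (Int × Int) × Int) (length_group : List Int) :
    List (Int × Int) × Int :=
  let (segres, index_end) := acc
  let index_start := index_end
  let index_end' := index_end + (length_group.length : Int)
  let segment_start := ((PySem.List.pyGet? l index_start).getD (0, 0)).1
  let segment_end := ((PySem.List.pyGet? l (index_end' - 1)).getD (0, 0)).2
  (segres ++ [(segment_start, segment_end)], index_end')

def binding_segment_index (sentence_index_list : List (Int × Int)) (unit : Int) : List (Int × Int) :=
  let length_list := sentence_index_list.map (fun p => p.2 - p.1)
  let st := length_list.foldl (pvStepA unit) ([], 0, [])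
  let result := if st.2.2 ≠ [] then st.1 ++ [st.2.2] else st.1
  (result.foldl (pvStepA2 sentence_index_list) ([], 0)).1

-- ===== PORT B =====
-- loop body: state (res, start, current_sum, i)
def pvStepB (l : List (Int × Int)) (unit : Int) (acc : List (Int × Int) × Int × Int × Int)
    (p : Int × Int) : List (Int × Int) × Int × Int × Int :=
  let (res, start, current_sum, i) := acc
  let length := p.2 - p.1
  if current_sum + length < unit then
    (res, (if start < 0 then i else start), current_sum + length, i + 1)
  else
    ((if 0 ≤ start then
        res ++ [(((PySem.List.pyGet? l start).getD (0, 0)).1,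
                 ((PySem.List.pyGet? l (i - 1)).getD (0, 0)).2)]
      else res), i, length, i + 1)

def binding_segment_index_alt (sentence_index_list : List (Int × Int)) (unit : Int) :
    List (Int × Int) :=
  let st := sentence_index_list.foldl (pvStepB sentence_index_list unit) ([], -1, 0, 0)
  if 0 ≤ st.2.1 then
    st.1 ++ [(((PySem.List.pyGet? sentence_index_list st.2.1).getD (0, 0)).1,
              ((PySem.List.pyGet? sentence_index_list (-1)).getD (0, 0)).2)]
  else st.1

-- ===== PRECONDITION & SPEC =====
def Spec_binding_segment_index (sentence_index_list : List (Int × Int)) (unit : Int) (out : List (Int × Int)) : Prop := out = binding_segment_index_alt sentence_index_list unit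
instance (sentence_index_list : List (Int × Int)) (unit : Int) (out : List (Int × Int)) : Decidable (Spec_binding_segment_index sentence_index_list unit out) := by unfold Spec_binding_segment_index; infer_instance

-- ===== CLAIM (what is proved, stated in full; the proofs are below) =====
def Claim_equal_binding_segment_index : Prop := ∀ (sentence_index_list : List (Int × Int)) (unit : Int), Dom_binding_segment_index sentence_index_list unit → Spec_binding_segment_index sentence_index_list unit (binding_segment_index sentence_index_list unit)

-- ===== LEMMAS AND PROOFS =====

theorem pyGet?_len_sub_one (l : List (Int × Int)) (h : l ≠ []) :
    PySem.List.pyGet? l ((l.length : Int) - 1) = PySem.List.pyGet? l (-1) := by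
  have hl : 0 < l.length := List.length_pos_iff.mpr h
  rw [PySem.List.pyGet?_neg_one]
  have : ((l.length : Int) - 1) = ((l.length - 1 : Nat) : Int) := by omega
  rw [this, PySem.List.pyGet?_natCast, List.getLast?_eq_getElem?]

theorem main_invariant (l : List (Int × Int)) (unit : Int) :
    ∀ (t : List (Int × Int)) (n : Nat) (resA : List (List Int)) (cs : Int) (grp : List Int)
      (resB : List (Int × Int)) (start : Int),
      n + t.length = l.length → l.drop n = t →
      (grp = [] → start = -1 ∧ resA = [] ∧ resB = [] ∧ n = 0) →
      (grp ≠ [] → start = (n : Int) - grp.length ∧ 0 ≤ start ∧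
        resA.foldl (pvStepA2 l) ([], 0) = (resB, start)) →
      (let st := (t.map fun p => p.2 - p.1).foldl (pvStepA unit) (resA, cs, grp)
       let result := if st.2.2 ≠ [] then st.1 ++ [st.2.2] else st.1
       (result.foldl (pvStepA2 l) ([], 0)).1) =
      (let st := t.foldl (pvStepB l unit) (resB, start, cs, (n : Int))
       if 0 ≤ st.2.1 then
         st.1 ++ [(((PySem.List.pyGet? l st.2.1).getD (0, 0)).1,
                   ((PySem.List.pyGet? l (-1)).getD (0, 0)).2)]
       else st.1) := by
  intro t
  induction t with
  | nil =>
    intro n resA cs grp resB start hlen hdrop hemp hne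
    simp only [List.map_nil, List.foldl_nil]
    by_cases hg : grp = []
    · obtain ⟨hs, hA, hB, hn⟩ := hemp hg
      subst hs hA hB
      simp [hg]
    · obtain ⟨hs, hs0, hfold⟩ := hne hg
      have hnl : n = l.length := by simpa using hlen
      have hgl : 0 < grp.length := List.length_pos_iff.mpr hg
      have hlpos : l ≠ [] := by
        intro h; subst h; simp only [List.length_nil] at hnl; omega
      simp only [if_pos (by simp [hg] : grp ≠ []), if_pos hs0]
      rw [List.foldl_append, hfold]
      simp only [List.foldl_cons, List.foldl_nil, pvStepA2]
      have : start + (grp.length : Int) - 1 = (l.length : Int) - 1 := by omega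
      rw [this, pyGet?_len_sub_one l hlpos]
  | cons p t ih =>
    intro n resA cs grp resB start hlen hdrop hemp hne
    have hdrop' : l.drop (n + 1) = t := by
      have h := congrArg (List.drop 1) hdrop
      simp only [List.drop_drop, List.drop_succ_cons, List.drop_zero] at h
      exact h
    have hlen' : (n + 1) + t.length = l.length := by
      simp only [List.length_cons] at hlen; omega
    simp only [List.map_cons, List.foldl_cons, pvStepA, pvStepB]
    have hcast : ((n : Int) + 1) = ((n + 1 : Nat) : Int) := by push_cast; ring
    by_cases hc : cs + (p.2 - p.1) < unit
    · rw [if_pos hc, if_pos hc, hcast]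
      by_cases hg : grp = []
      · obtain ⟨hs, hA, hB, hn⟩ := hemp hg
        subst hs hA hB hg hn
        rw [if_pos (by norm_num : (-1 : Int) < 0)]
        exact ih 1 [] (cs + (p.2 - p.1)) [p.2 - p.1] [] 0 hlen' hdrop'
          (by simp) (fun _ => ⟨by simp, le_refl 0, by simp⟩)
      · obtain ⟨hs, hs0, hfold⟩ := hne hg
        rw [if_neg (by omega : ¬ start < 0)]
        refine ih (n + 1) resA (cs + (p.2 - p.1)) (grp ++ [p.2 - p.1]) resB start hlen' hdrop'
          (by simp) (fun _ => ⟨?_, hs0, hfold⟩)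
        simp only [List.length_append, List.length_cons, List.length_nil]
        push_cast
        omega
    · rw [if_neg hc, if_neg hc, hcast]
      by_cases hg : grp = []
      · obtain ⟨hs, hA, hB, hn⟩ := hemp hg
        subst hs hA hB hg hn
        rw [if_neg (show ¬ 0 < List.length ([] : List Int) by simp),
            if_neg (show ¬ (0 : Int) ≤ -1 by norm_num)]
        exact ih 1 [] (p.2 - p.1) [p.2 - p.1] [] 0 hlen' hdrop'
          (by simp) (fun _ => ⟨by simp, le_refl 0, by simp⟩)
      · obtain ⟨hs, hs0, hfold⟩ := hne hg
        have hgl : 0 < grp.length := List.length_pos_iff.mpr hg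
        rw [if_pos (by omega : 0 < grp.length), if_pos hs0]
        refine ih (n + 1) (resA ++ [grp]) (p.2 - p.1) [p.2 - p.1]
          (resB ++ [(((PySem.List.pyGet? l start).getD (0, 0)).1,
                     ((PySem.List.pyGet? l ((n : Int) - 1)).getD (0, 0)).2)]) (n : Int)
          hlen' hdrop' (by simp) (fun _ => ⟨?_, by positivity, ?_⟩)
        · simp only [List.length_cons, List.length_nil]
          push_cast; omega
        · rw [List.foldl_append, hfold]
          simp only [List.foldl_cons, List.foldl_nil, pvStepA2]
          have h1 : start + (grp.length : Int) = (n : Int) := by omega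
          rw [h1]

-- ===== VERDICT (by name: the statement is the Claim_ definition above) =====
theorem binding_segment_index_spec : Claim_equal_binding_segment_index := by
  intro l unit _
  unfold Spec_binding_segment_index binding_segment_index binding_segment_index_alt
  exact main_invariant l unit l 0 [] 0 [] [] (-1) (by simp) (by simp)
    (fun _ => ⟨rfl, rfl, rfl, rfl⟩) (fun h => absurd rfl h)
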